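-- pv_equiv track=rewrite | github.com/fgahr/aoc2015 | day3/day3.py | places
-- ===== SOURCE A (Python) =====
-- from typing import List
-- from typing import NewType
--
-- Coord = NewType('coordinate', (int, int))
--
-- def places(data: str) -> List[Coord]:
--     """The places visited after following the instructions from data."""
--     current_position = (0, 0)
--     positions = [current_position]
--     for instruction in data:
--         if instruction == '^':
--             current_position = move_up(current_position)
--         elif instruction == 'v':
--             current_position = move_down(current_position)
--         elif instruction == '<':
--             current_position = move_left(current_position)
--         elif instruction == '>':
--             current_position = move_right(current_position)
--         positions.append(current_position)
--     return positions
--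
-- def move_up(place: Coord) -> Coord:
--     """Move up from place."""
--     x_place, y_place = place
--     return (x_place, y_place + 1)
--
-- def move_down(place: Coord) -> Coord:
--     """Move down from place."""
--     x_place, y_place = place
--     return (x_place, y_place - 1)
--
-- def move_left(place: Coord) -> Coord:
--     """Move left from place."""
--     x_place, y_place = place
--     return (x_place - 1, y_place)
--
-- def move_right(place: Coord) -> Coord:
--     """Move right from place."""
--     x_place, y_place = place
--     return (x_place + 1, y_place)
-- ===== SOURCE B (Python) =====
-- def places(data):
--     """The places visited after following the instructions from data."""
--     deltas = {'^': (0, 1), 'v': (0, -1), '<': (-1, 0), '>': (1, 0)}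
--
--     def go(s):
--         if len(s) == 0:
--             return [(0, 0)]
--         if len(s) == 1:
--             return [(0, 0), deltas.get(s[0], (0, 0))]
--         mid = len(s) // 2
--         left = go(s[:mid])
--         right = go(s[mid:])
--         x, y = left[-1]
--         return left + [(x + dx, y + dy) for (dx, dy) in right[1:]]
--
--     return go(data)
-- ===== Notes on version B (the rewrite author's own statement) =====
-- stated objective: alternative
-- what changed: Replaced the left-to-right stateful walk (one current position updated and appended per instruction) by a divide-and-conquer: split the instruction string in half, recursively compute each half's visited positions relative to its own start, then translate the right half's positions by the left half's endpoint and concatenate.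
import Mathlib
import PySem

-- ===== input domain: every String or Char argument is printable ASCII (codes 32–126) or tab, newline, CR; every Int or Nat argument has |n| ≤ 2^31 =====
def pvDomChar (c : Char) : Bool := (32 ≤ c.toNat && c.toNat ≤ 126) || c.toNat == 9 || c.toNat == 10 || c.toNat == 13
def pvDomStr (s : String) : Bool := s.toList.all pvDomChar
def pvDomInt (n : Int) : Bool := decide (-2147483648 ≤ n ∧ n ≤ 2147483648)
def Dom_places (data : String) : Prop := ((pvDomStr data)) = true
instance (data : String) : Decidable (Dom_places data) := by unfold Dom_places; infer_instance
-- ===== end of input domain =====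

-- B replaces A's left-to-right stateful walk by divide-and-conquer: each half's
-- positions are computed recursively and the right half's are translated by the
-- left half's endpoint (alternative algorithm; same value on every input).

-- ===== PORT A =====
def move_up (place : Int × Int) : Int × Int := (place.1, place.2 + 1)
def move_down (place : Int × Int) : Int × Int := (place.1, place.2 - 1)
def move_left (place : Int × Int) : Int × Int := (place.1 - 1, place.2)
def move_right (place : Int × Int) : Int × Int := (place.1 + 1, place.2)

-- the body of A's for-loop: update current_position, append it to positions
def placesStep (s : (Int × Int) × List (Int × Int)) (instruction : Char) :
    (Int × Int) × List (Int × Int) :=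
  let cur :=
    if instruction = '^' then move_up s.1
    else if instruction = 'v' then move_down s.1
    else if instruction = '<' then move_left s.1
    else if instruction = '>' then move_right s.1
    else s.1
  (cur, s.2 ++ [cur])

def places (data : String) : List (Int × Int) :=
  (data.toList.foldl placesStep ((0, 0), [(0, 0)])).2

-- ===== PORT B =====
-- Source B's deltas table
def DELTAS : PySem.Dict Char (Int × Int) :=
  PySem.Dict.ofList [('^', (0, 1)), ('v', (0, -1)), ('<', (-1, 0)), ('>', (1, 0))]

-- Source B's go(s): split in half, recurse, shift the right half by the left endpoint
def goB (s : List Char) : List (Int × Int) :=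
  if s.length = 0 then [(0, 0)]
  else if s.length = 1 then
    -- s[0]: always in range here (length = 1), so the pyGetD default is never used
    [(0, 0), DELTAS.getD (PySem.List.pyGetD s 0 ' ') (0, 0)]
  else
    let mid := s.length / 2
    let left := goB (PySem.List.slice s none (some (mid : Int)))      -- s[:mid]
    let right := goB (PySem.List.slice s (some (mid : Int)) none)     -- s[mid:]
    let last := PySem.List.pyGetD left (-1) (0, 0)                    -- left[-1]
    left ++ (PySem.List.slice right (some 1) none).map               -- right[1:]
      (fun d => (last.1 + d.1, last.2 + d.2))
termination_by s.length
decreasing_by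
  · rw [PySem.List.slice_to_natCast, List.length_take]; omega
  · rw [PySem.List.slice_from_natCast, List.length_drop]; omega

def places_alt (data : String) : List (Int × Int) := goB data.toList

-- ===== PRECONDITION & SPEC =====
def Spec_places (data : String) (out : List (Int × Int)) : Prop := out = places_alt data
instance (data : String) (out : List (Int × Int)) : Decidable (Spec_places data out) := by unfold Spec_places; infer_instance

-- ===== CLAIM (what is proved, stated in full; the proofs are below) =====
def Claim_equal_places : Prop := ∀ (data : String), Dom_places data → Spec_places data (places data)

-- ===== LEMMAS AND PROOFS =====

-- net direction count of a list: +1 per `plus`, -1 per `minus` (the reference value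
-- both programs compute per prefix)
def net (pre : List Char) (plus minus : Char) : Int :=
  pre.foldl (fun c ch => if ch = plus then c + 1 else if ch = minus then c - 1 else c) 0

lemma net_foldl (l : List Char) (p m : Char) : ∀ c : Int,
    l.foldl (fun c ch => if ch = p then c + 1 else if ch = m then c - 1 else c) c
      = c + net l p m := by
  induction l with
  | nil => intro c; simp [net]
  | cons ch l ih =>
    intro c
    have hcons : net (ch :: l) p m
        = (if ch = p then (0 : Int) + 1 else if ch = m then 0 - 1 else 0) + net l p m := by
      simp only [net, List.foldl_cons]
      exact ih _
    simp only [List.foldl_cons]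
    rw [ih _, hcons]
    split_ifs <;> omega

lemma net_app (a b : List Char) (p m : Char) :
    net (a ++ b) p m = net a p m + net b p m := by
  simp only [net, List.foldl_append]
  rw [net_foldl]
  rfl

lemma net_append (l : List Char) (c plus minus : Char) :
    net (l ++ [c]) plus minus =
      if c = plus then net l plus minus + 1
      else if c = minus then net l plus minus - 1 else net l plus minus := by
  simp [net, List.foldl_append]

-- the reference list: one pair of net counts per prefix
def netMap (s : List Char) : List (Int × Int) :=
  (List.range (s.length + 1)).map
    (fun k => (net (s.take k) '>' '<', net (s.take k) '^' 'v'))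

-- A's fold computes the per-prefix net counts
lemma fold_eq (l : List Char) :
    l.foldl placesStep ((0, 0), [(0, 0)]) =
      ((net l '>' '<', net l '^' 'v'), netMap l) := by
  induction l using List.reverseRecOn with
  | nil => simp [net, netMap, List.range_succ]
  | append_singleton l c ih =>
    rw [List.foldl_append, ih]
    have hrange : List.range (l.length + 1 + 1) = List.range (l.length + 1) ++ [l.length + 1] := by
      simp [List.range_succ]
    have htake : ∀ k ∈ List.range (l.length + 1), (l ++ [c]).take k = l.take k := by
      intro k hk
      rw [List.mem_range] at hk
      rw [List.take_append_of_le_length (by omega)]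
    have hlast : (l ++ [c]).take (l.length + 1) = l ++ [c] := by
      rw [List.take_of_length_le (by simp)]
    have hmap :
        (List.range (l.length + 1)).map
            (fun k => (net ((l ++ [c]).take k) '>' '<', net ((l ++ [c]).take k) '^' 'v'))
          = (List.range (l.length + 1)).map
            (fun k => (net (l.take k) '>' '<', net (l.take k) '^' 'v')) :=
      List.map_congr_left (fun k hk => by rw [htake k hk])
    simp only [netMap, List.foldl_cons, List.foldl_nil, placesStep, List.length_append,
      List.length_singleton, hrange, List.map_append, List.map_cons, List.map_nil,
      hmap, hlast]
    rw [net_append, net_append]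
    have hcur : (if c = '^' then move_up (net l '>' '<', net l '^' 'v')
          else if c = 'v' then move_down (net l '>' '<', net l '^' 'v')
          else if c = '<' then move_left (net l '>' '<', net l '^' 'v')
          else if c = '>' then move_right (net l '>' '<', net l '^' 'v')
          else (net l '>' '<', net l '^' 'v'))
        = ((if c = '>' then net l '>' '<' + 1 else if c = '<' then net l '>' '<' - 1 else net l '>' '<'),
           (if c = '^' then net l '^' 'v' + 1 else if c = 'v' then net l '^' 'v' - 1 else net l '^' 'v')) := by
      by_cases h1 : c = '^' <;> by_cases h2 : c = 'v' <;> by_cases h3 : c = '<' <;>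
        by_cases h4 : c = '>' <;> simp_all [move_up, move_down, move_left, move_right]
    rw [hcur]

-- the deltas table decodes one character's net counts
lemma getD_eq_net (c : Char) :
    DELTAS.getD c (0, 0) = (net [c] '>' '<', net [c] '^' 'v') := by
  by_cases h1 : c = '^' <;> by_cases h2 : c = 'v' <;> by_cases h3 : c = '<' <;>
    by_cases h4 : c = '>' <;>
    · subst_vars ; first
      | decide
      | (have e : DELTAS.getD c (0, 0) = (0, 0) := by
          have hD : DELTAS = PySem.Dict.mk [('^', (0, 1)), ('v', (0, -1)), ('<', (-1, 0)), ('>', (1, 0))] := by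
            decide
          simp [hD, PySem.Dict.getD, PySem.Dict.get?,
            Ne.symm h1, Ne.symm h2, Ne.symm h3, Ne.symm h4]
         simp [e, net, h1, h2, h3, h4])

-- B's divide-and-conquer computes the same per-prefix net counts
lemma goB_eq (s : List Char) : goB s = netMap s := by
  induction s using goB.induct with
  | case1 s h0 =>
    have : s = [] := List.length_eq_zero_iff.mp h0
    subst this
    simp [goB, netMap, List.range_succ, net]
  | case2 s h0 h1 =>
    obtain ⟨c, rfl⟩ := List.length_eq_one_iff.mp h1
    rw [goB]
    simp only [List.length_singleton, if_neg (by omega : ¬(1 : Nat) = 0)]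
    have hget : PySem.List.pyGetD [c] 0 ' ' = c := by
      simp [PySem.List.pyGetD, PySem.List.pyGet?, PySem.List.pyIdx?]
    rw [hget, getD_eq_net]
    simp [netMap, List.range_succ, net]
  | case3 s h0 h1 mid ihL ihR =>
    have hmid : (mid : Nat) = s.length / 2 := rfl
    rw [hmid] at ihL ihR
    have hml : s.length / 2 ≤ s.length := Nat.div_le_self _ _
    have hsl1 : PySem.List.slice s none (some ((s.length / 2 : Nat) : Int)) = s.take (s.length / 2) := by
      rw [PySem.List.slice_to_natCast]
    have hsl2 : PySem.List.slice s (some ((s.length / 2 : Nat) : Int)) none = s.drop (s.length / 2) := by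
      rw [PySem.List.slice_from_natCast]
    rw [goB, if_neg h0, if_neg h1]
    rw [hsl1] at ihL
    rw [hsl2] at ihR
    simp only [hsl1, hsl2, ihL, ihR]
    have hLlen : (s.take (s.length / 2)).length = s.length / 2 := by rw [List.length_take]; omega
    have hRlen : (s.drop (s.length / 2)).length = s.length - s.length / 2 := by rw [List.length_drop]
    have hfL : netMap (s.take (s.length / 2))
        = (List.range (s.length / 2 + 1)).map
            (fun k => (net (s.take k) '>' '<', net (s.take k) '^' 'v')) := by
      unfold netMap
      rw [hLlen]
      refine List.map_congr_left (fun k hk => ?_)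
      rw [List.mem_range] at hk
      rw [List.take_take, Nat.min_eq_left (by omega)]
    have hfR : netMap (s.drop (s.length / 2))
        = (List.range (s.length - s.length / 2 + 1)).map
            (fun j => (net ((s.drop (s.length / 2)).take j) '>' '<',
                       net ((s.drop (s.length / 2)).take j) '^' 'v')) := by
      unfold netMap
      rw [hRlen]
    have hlast : PySem.List.pyGetD (netMap (s.take (s.length / 2))) (-1) ((0 : Int), (0 : Int))
        = (net (s.take (s.length / 2)) '>' '<', net (s.take (s.length / 2)) '^' 'v') := by
      rw [hfL, List.range_succ, List.map_append, List.map_cons, List.map_nil,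
        PySem.List.pyGetD_neg_one_append_singleton]
    have htail : PySem.List.slice (netMap (s.drop (s.length / 2))) (some 1) none
        = (netMap (s.drop (s.length / 2))).tail := by
      rw [PySem.List.slice_from_one]
    rw [hlast, htail, hfR]
    rw [List.range_succ_eq_map]
    simp only [List.map_cons, List.tail_cons, List.map_map]
    rw [hfL]
    unfold netMap
    conv_rhs => rw [show s.length + 1 = (s.length / 2 + 1) + (s.length - s.length / 2) from by omega,
      List.range_add, List.map_append]
    congr 1
    rw [List.map_map]
    refine List.map_congr_left (fun j hj => ?_)
    simp only [Function.comp_apply, Nat.succ_eq_add_one]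
    rw [show (s.length / 2 + 1) + j = s.length / 2 + (j + 1) from by omega]
    conv_rhs => rw [List.take_add]
    rw [net_app, net_app]

-- ===== VERDICT (by name: the statement is the Claim_ definition above) =====
theorem places_spec : Claim_equal_places := by
  intro data _
  unfold Spec_places places places_alt
  rw [goB_eq, fold_eq]
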